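-- pv_equiv track=rewrite | github.com/johnvtan/stuff | aoc/2019/day12/main.py | time_until_repeat
-- ===== SOURCE A (Python) =====
-- def time_until_repeat(orig_pos: list[int]) -> int:
--     # Return the timestep which repeats the initial position
--     pos = [p for p in orig_pos]
--     vel = [0 for _ in pos]
--     t = 0
--
--     while True:
--         t += 1
--         for i in range(len(pos)):
--             acc = len(list(filter(lambda x: x > pos[i], pos))) - len(
--                 list(filter(lambda x: x < pos[i], pos))
--             )
--             vel[i] += acc
--         for i in range(len(pos)):
--             pos[i] += vel[i]
--
--         if all(v == 0 for v in vel) and all(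
--             pos[i] == orig_pos[i] for i in range(len(pos))
--         ):
--             return t
-- ===== SOURCE B (Python) =====
-- def time_until_repeat(orig_pos: list[int]) -> int:
--     # Sort positions each step; acceleration of a value v is
--     # (count greater) - (count less) = (n - one_past_last_rank) - first_rank.
--     n = len(orig_pos)
--     pos = list(orig_pos)
--     vel = [0] * n
--     t = 0
--     while True:
--         t += 1
--         s = sorted(pos)
--         first = {}
--         last = {}
--         for idx, v in enumerate(s):
--             if v not in first:
--                 first[v] = idx
--             last[v] = idx + 1
--         vel = [w + (n - last[p]) - first[p] for w, p in zip(vel, pos)]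
--         pos = [p + w for p, w in zip(pos, vel)]
--         if all(w == 0 for w in vel) and pos == orig_pos:
--             return t
-- ===== Notes on version B (the rewrite author's own statement) =====
-- stated objective: alternative
-- what changed: Each step, instead of two O(n) filter passes per body (O(n^2) per step), B sorts the positions once and reads every body's acceleration off first/last ranks of its value in the sorted list ((n - one_past_last_rank) - first_rank), built by one linear scan into two dicts; per-step cost drops from O(n^2) to O(n log n) but the step count T dominates, so no speed-up was measured.
import Mathlib
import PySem

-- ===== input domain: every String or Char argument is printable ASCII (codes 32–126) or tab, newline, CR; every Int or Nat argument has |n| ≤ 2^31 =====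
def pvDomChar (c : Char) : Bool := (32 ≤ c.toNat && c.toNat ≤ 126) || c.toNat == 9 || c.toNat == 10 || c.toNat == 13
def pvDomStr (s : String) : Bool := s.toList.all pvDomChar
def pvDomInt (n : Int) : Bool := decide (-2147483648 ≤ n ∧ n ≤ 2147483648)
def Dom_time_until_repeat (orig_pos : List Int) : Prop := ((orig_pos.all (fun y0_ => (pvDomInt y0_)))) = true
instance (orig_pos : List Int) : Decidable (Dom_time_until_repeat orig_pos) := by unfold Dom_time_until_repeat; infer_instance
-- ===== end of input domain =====

-- ===== PORT A =====
-- B changes the per-step acceleration computation: sorted ranks (one sort + one linear scan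
-- per step) instead of A's two filter passes per body; return value only (A never mutates its argument).

-- fuel bound making A's `while True` total in Lean; a pure guard (both loops run in lockstep,
-- so the exhaustion branch never separates the ports)
def pvFuel : Nat := 2 ^ 64

-- acceleration of a body at position p: A's two filter passes
def accA (pos : List Int) (p : Int) : Int :=
  ((pos.filter (fun x => decide (p < x))).length : Int)
    - ((pos.filter (fun x => decide (x < p))).length : Int)

-- one iteration of A's while-body: the two index loops (pos[i] is always in range,
-- so List.getD is exact for Python's pos[i] here)
def stepA (pos vel : List Int) : List Int × List Int :=
  let vel' := (List.range pos.length).map (fun i => vel.getD i 0 + accA pos (pos.getD i 0))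
  let pos' := (List.range pos.length).map (fun i => pos.getD i 0 + vel'.getD i 0)
  (pos', vel')

def loopA (orig : List Int) : Nat → List Int → List Int → Int → Int
  | 0, _, _, t => t
  | fuel + 1, pos, vel, t =>
    let t := t + 1
    let pv := stepA pos vel
    if (pv.2.all (fun v => v == 0)) &&
        ((List.range pv.1.length).all (fun i => pv.1.getD i 0 == orig.getD i 0)) then t
    else loopA orig fuel pv.1 pv.2 t

def time_until_repeat (orig_pos : List Int) : Int :=
  loopA orig_pos pvFuel orig_pos (orig_pos.map (fun _ => 0)) 0

-- ===== PORT B =====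
-- first/last rank dicts built by one scan over the sorted positions (Source B's enumerate loop)
def buildFL (s : List Int) : PySem.Dict Int Int × PySem.Dict Int Int :=
  (PySem.List.enumerate s 0).foldl
    (fun fl iv =>
      (if fl.1.contains iv.2 then fl.1 else fl.1.insert iv.2 iv.1,
       fl.2.insert iv.2 (iv.1 + 1)))
    (PySem.Dict.empty, PySem.Dict.empty)

-- one iteration of Source B's while-body (pos's keys are all present in the dicts, so getD's
-- default is never read where Python indexes acc dicts)
def stepB (pos vel : List Int) : List Int × List Int :=
  let n : Int := pos.length
  let s := PySem.List.sorted pos (fun x => x) false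
  let fl := buildFL s
  let vel' := (vel.zip pos).map (fun wp => wp.1 + (n - fl.2.getD wp.2 0) - fl.1.getD wp.2 0)
  let pos' := (pos.zip vel').map (fun pw => pw.1 + pw.2)
  (pos', vel')

def loopB (orig : List Int) : Nat → List Int → List Int → Int → Int
  | 0, _, _, t => t
  | fuel + 1, pos, vel, t =>
    let t := t + 1
    let pv := stepB pos vel
    if (pv.2.all (fun w => w == 0)) && (pv.1 == orig) then t
    else loopB orig fuel pv.1 pv.2 t

def time_until_repeat_alt (orig_pos : List Int) : Int :=
  loopB orig_pos pvFuel orig_pos (orig_pos.map (fun _ => 0)) 0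

-- ===== PRECONDITION & SPEC =====
def Spec_time_until_repeat (orig_pos : List Int) (out : Int) : Prop := out = time_until_repeat_alt orig_pos
instance (orig_pos : List Int) (out : Int) : Decidable (Spec_time_until_repeat orig_pos out) := by unfold Spec_time_until_repeat; infer_instance

-- ===== CLAIM (what is proved, stated in full; the proofs are below) =====
def Claim_equal_time_until_repeat : Prop := ∀ (orig_pos : List Int), Dom_time_until_repeat orig_pos → Spec_time_until_repeat orig_pos (time_until_repeat orig_pos)

-- ===== LEMMAS AND PROOFS =====

-- unfolding B's scan over one more (maximal) element
theorem buildFL_append (p : List Int) (a : Int) :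
    buildFL (p ++ [a]) =
      ((if (buildFL p).1.contains a then (buildFL p).1 else (buildFL p).1.insert a (p.length : Int)),
       (buildFL p).2.insert a ((p.length : Int) + 1)) := by
  simp [buildFL, PySem.List.enumerate_append, List.foldl_append,
    PySem.List.enumerate_cons, PySem.List.enumerate_nil]

-- the scan's dicts on a sorted list: first rank of v = #(< v), one past last rank = #(≤ v)
theorem buildFL_spec (s : List Int) (hs : s.Pairwise (· ≤ ·)) :
    ∀ v, ((buildFL s).1.contains v = decide (v ∈ s)) ∧
      (v ∈ s →
        (buildFL s).1.getD v 0 = ((s.countP (fun x => decide (x < v))) : Int) ∧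
        (buildFL s).2.getD v 0 = ((s.countP (fun x => decide (x ≤ v))) : Int)) := by
  induction s using List.reverseRecOn with
  | nil =>
    intro v
    simp [buildFL, PySem.List.enumerate_nil]
  | append_singleton p a ih =>
    have hp : p.Pairwise (· ≤ ·) := (List.pairwise_append.mp hs).1
    have hall : ∀ x ∈ p, x ≤ a := by
      intro x hx
      exact (List.pairwise_append.mp hs).2.2 x hx a (by simp)
    have ihp := ih hp
    intro v
    rw [buildFL_append]
    constructor
    · by_cases hca : (buildFL p).1.contains a = true
      · have hain : a ∈ p := by
          have := (ihp a).1
          rw [hca] at this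
          exact of_decide_eq_true this.symm
        simp only [hca, if_pos]
        rw [(ihp v).1]
        by_cases hva : v = a <;> simp [hva, List.mem_append, hain]
      · simp only [hca, if_neg, Bool.not_eq_true]
        rw [PySem.Dict.contains_insert, (ihp v).1]
        by_cases hva : v = a <;> simp [hva, List.mem_append]
    · intro hv
      by_cases hva : v = a
      · subst hva
        have hle : ∀ x ∈ p, decide (x ≤ v) = true := fun x hx => decide_eq_true (hall x hx)
        constructor
        · by_cases hca : (buildFL p).1.contains v = true
          · have hain : v ∈ p := by
              have := (ihp v).1; rw [hca] at this; exact of_decide_eq_true this.symm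
            simp only [hca, if_pos]
            rw [((ihp v).2 hain).1]
            simp [List.countP_append]
          · have hnin : v ∉ p := by
              have := (ihp v).1
              simp [hca] at this
              simpa using this
            simp only [hca, if_neg, Bool.not_eq_true]
            rw [PySem.Dict.getD_insert]
            have : p.countP (fun x => decide (x < v)) = p.length := by
              apply List.countP_eq_length.mpr
              intro x hx
              have hxa := hall x hx
              have : x ≠ v := fun h => hnin (h ▸ hx)
              simp [lt_of_le_of_ne hxa this]
            simp [List.countP_append, this]
        · rw [PySem.Dict.getD_insert]
          have : p.countP (fun x => decide (x ≤ v)) = p.length :=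
            List.countP_eq_length.mpr hle
          simp [List.countP_append, this]
      · have hvp : v ∈ p := by
          rcases List.mem_append.mp hv with h' | h'
          · exact h'
          · simp at h'; exact absurd h' hva
        have hva' : ¬ (a ≤ v) := by
          intro hle'
          exact hva (le_antisymm (hall v hvp) hle')
        have hcnt1 : (p ++ [a]).countP (fun x => decide (x < v)) = p.countP (fun x => decide (x < v)) := by
          have hlt : ¬ (a < v) := fun h => hva' h.le
          simp [List.countP_append, hlt]
        have hcnt2 : (p ++ [a]).countP (fun x => decide (x ≤ v)) = p.countP (fun x => decide (x ≤ v)) := by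
          simp [List.countP_append, hva']
        constructor
        · rw [hcnt1, ← ((ihp v).2 hvp).1]
          by_cases hca : (buildFL p).1.contains a = true
          · simp [hca]
          · simp only [hca, if_neg, Bool.not_eq_true]
            rw [PySem.Dict.getD_insert, if_neg hva]
        · rw [hcnt2, ← ((ihp v).2 hvp).2]
          rw [PySem.Dict.getD_insert, if_neg hva]

-- per-element agreement of the two acceleration computations
theorem acc_eq (pos : List Int) (p : Int) (hp : p ∈ pos) :
    ((pos.length : Int) - ((buildFL (PySem.List.sorted pos (fun x => x) false)).2.getD p 0))
      - ((buildFL (PySem.List.sorted pos (fun x => x) false)).1.getD p 0) = accA pos p := by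
  set s := PySem.List.sorted pos (fun x => x) false with hsdef
  have hpair : s.Pairwise (· ≤ ·) := PySem.List.sorted_pairwise pos (fun x => x)
  have hps : p ∈ s := (PySem.List.mem_sorted pos (fun x => x) false p).mpr hp
  have hperm : s.Perm pos := PySem.List.sorted_perm pos (fun x => x) false
  obtain ⟨h1, h2⟩ := (buildFL_spec s hpair p).2 hps
  rw [h1, h2, hperm.countP_eq, hperm.countP_eq]
  have hsplit : pos.countP (fun x => decide (x ≤ p)) + pos.countP (fun x => decide (p < x)) = pos.length := by
    rw [List.length_eq_countP_add_countP (p := fun x => decide (x ≤ p)) (l := pos)]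
    congr 1
    apply List.countP_congr
    intro x _
    simp
  have hf1 : (pos.filter (fun x => decide (p < x))).length = pos.countP (fun x => decide (p < x)) :=
    (List.countP_eq_length_filter (p := _) (l := pos)).symm
  have hf2 : (pos.filter (fun x => decide (x < p))).length = pos.countP (fun x => decide (x < p)) :=
    (List.countP_eq_length_filter (p := _) (l := pos)).symm
  unfold accA
  rw [hf1, hf2]
  omega

-- A's indexed elementwise loop is B's zip comprehension (same lengths)
theorem range_map_eq_zip_map (xs ys : List Int) (f g : Int → Int → Int)
    (h : xs.length = ys.length) (hfg : ∀ y ∈ ys, ∀ x, f x y = g x y) :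
    (List.range ys.length).map (fun i => f (xs.getD i 0) (ys.getD i 0))
      = (xs.zip ys).map (fun p => g p.1 p.2) := by
  induction xs generalizing ys with
  | nil => cases ys with
    | nil => simp
    | cons y ys => simp at h
  | cons x xs ih =>
    cases ys with
    | nil => simp at h
    | cons y ys =>
      simp only [List.length_cons, List.range_succ_eq_map, List.map_cons, List.map_map]
      simp only [List.getD_cons_zero, List.zip_cons_cons, List.map_cons]
      rw [hfg y (by simp) x]
      congr 1
      have := ih ys (by simpa using h) (fun y hy x => hfg y (by simp [hy]) x)
      simpa using this

-- A's indexed elementwise equality test is B's list equality (same lengths)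
theorem range_all_eq_beq (xs ys : List Int) (h : xs.length = ys.length) :
    ((List.range xs.length).all (fun i => xs.getD i 0 == ys.getD i 0)) = (xs == ys) := by
  induction xs generalizing ys with
  | nil => cases ys with
    | nil => simp
    | cons y ys => simp at h
  | cons x xs ih =>
    cases ys with
    | nil => simp at h
    | cons y ys =>
      simp only [List.length_cons, List.range_succ_eq_map, List.all_cons, List.all_map]
      simp only [List.getD_cons_zero, Function.comp_def, List.getD_cons_succ]
      rw [ih ys (by simpa using h)]
      simp [List.cons_beq_cons]

-- the two while-bodies coincide when vel and pos have equal length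
theorem stepB_eq_stepA (pos vel : List Int) (h : vel.length = pos.length) :
    stepB pos vel = stepA pos vel := by
  unfold stepA stepB
  dsimp only
  have e1 : (vel.zip pos).map (fun wp => wp.1
        + (((pos.length : Int)) - (buildFL (PySem.List.sorted pos (fun x => x) false)).2.getD wp.2 0)
        - (buildFL (PySem.List.sorted pos (fun x => x) false)).1.getD wp.2 0)
      = (List.range pos.length).map (fun i => vel.getD i 0 + accA pos (pos.getD i 0)) := by
    refine (range_map_eq_zip_map vel pos
      (fun x y => x + accA pos y)
      (fun x y => x + (((pos.length : Int)) - (buildFL (PySem.List.sorted pos (fun x => x) false)).2.getD y 0)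
        - (buildFL (PySem.List.sorted pos (fun x => x) false)).1.getD y 0) h ?_).symm
    intro y hy x
    show x + accA pos y = _
    rw [← acc_eq pos y hy]
    ring
  rw [e1]
  set w := (List.range pos.length).map (fun i => vel.getD i 0 + accA pos (pos.getD i 0)) with hw
  have hlen : w.length = pos.length := by rw [hw]; simp
  congr 1
  rw [show List.range pos.length = List.range w.length from by rw [hlen]]
  exact (range_map_eq_zip_map pos w (fun x y => x + y) (fun x y => x + y) hlen.symm (fun _ _ _ => rfl)).symm

theorem stepA_lengths (pos vel : List Int) :
    (stepA pos vel).1.length = pos.length ∧ (stepA pos vel).2.length = pos.length := by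
  constructor <;> simp [stepA]

-- the two loops run in lockstep
theorem loopB_eq_loopA (orig : List Int) (fuel : Nat) :
    ∀ pos vel t, pos.length = orig.length → vel.length = orig.length →
      loopB orig fuel pos vel t = loopA orig fuel pos vel t := by
  induction fuel with
  | zero => intro pos vel t _ _; rfl
  | succ fuel ih =>
    intro pos vel t hp hv
    rw [loopB, loopA]
    rw [stepB_eq_stepA pos vel (hv.trans hp.symm)]
    obtain ⟨h1, h2⟩ := stepA_lengths pos vel
    rw [range_all_eq_beq (stepA pos vel).1 orig (h1.trans hp)]
    split_ifs with hc
    · rfl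
    · exact ih (stepA pos vel).1 (stepA pos vel).2 (t + 1) (h1.trans hp) (h2.trans hp)

-- ===== VERDICT (by name: the statement is the Claim_ definition above) =====
theorem time_until_repeat_spec : Claim_equal_time_until_repeat := by
  intro orig _
  unfold Spec_time_until_repeat time_until_repeat time_until_repeat_alt
  exact (loopB_eq_loopA orig pvFuel orig (orig.map (fun _ => 0)) 0 rfl (by simp)).symm
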